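-- pv_equiv track=rewrite | github.com/gogoliri/graph_algorithm | Assignment 1/allMinSpanT.py | tree2dict
-- ===== SOURCE A (Python) =====
-- def tree2dict(tree):
--     """Convert a tree to a adj dict"""
--
--     adj_dict = {}
--     for node, parent in tree.items():
--         if parent not in adj_dict.keys():
--             adj_dict[parent] = [node]
--         else:
--             adj_dict[parent].append(node)
--     return adj_dict
-- ===== SOURCE B (Python) =====
-- def tree2dict(tree):
--     """Convert a tree to a adj dict"""
--     parents = dict.fromkeys(tree.values())  # distinct parents, first-occurrence order
--     return {p: [node for node, parent in tree.items() if parent == p] for p in parents}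
-- ===== Notes on version B (the rewrite author's own statement) =====
-- stated objective: alternative
-- what changed: A groups children in one pass, inserting/appending into a dict keyed by parent; B first collects the distinct parents (first-occurrence order) and then builds the result as a dict comprehension whose value for each parent is a fresh scan of tree.items(), trading the single grouping pass for an outer loop over distinct parents with an inner scan.
import Mathlib
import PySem

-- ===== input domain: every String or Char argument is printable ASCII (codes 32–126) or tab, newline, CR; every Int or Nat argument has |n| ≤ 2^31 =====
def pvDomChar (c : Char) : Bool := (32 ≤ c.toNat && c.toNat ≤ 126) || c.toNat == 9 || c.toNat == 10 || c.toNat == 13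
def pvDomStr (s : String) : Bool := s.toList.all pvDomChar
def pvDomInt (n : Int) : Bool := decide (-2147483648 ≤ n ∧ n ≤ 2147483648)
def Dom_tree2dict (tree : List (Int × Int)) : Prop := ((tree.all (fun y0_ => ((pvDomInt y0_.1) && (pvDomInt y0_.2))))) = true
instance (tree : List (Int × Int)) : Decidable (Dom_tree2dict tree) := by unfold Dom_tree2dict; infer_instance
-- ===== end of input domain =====

-- B replaces A's single grouping pass with an outer pass over the distinct parents and an
-- inner rescan of the items per parent (objective: alternative decomposition, same result).

-- ===== PORT A =====
-- dict membership test `parent not in adj_dict.keys()` (exact: any key matches)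
def pvHasKey (d : List (Int × List Int)) (p : Int) : Bool := (d.map Prod.fst).contains p
-- `adj_dict[parent].append(node)` on a present key (exact dict semantics: the unique
-- entry with key p gets node appended; keys of A's dict are distinct by construction)
def pvAppendAt : List (Int × List Int) → Int → Int → List (Int × List Int)
  | [], _, _ => []
  | (k, v) :: d, p, n => if k = p then (k, v ++ [n]) :: d else (k, v) :: pvAppendAt d p n

def tree2dict (tree : List (Int × Int)) : List (Int × List Int) :=
  tree.foldl
    (fun d nt =>
      if pvHasKey d nt.2 then pvAppendAt d nt.2 nt.1
      else d ++ [(nt.2, [nt.1])])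
    []

-- ===== PORT B =====
-- `dict.fromkeys(tree.values())`: the distinct parents in first-occurrence order (exact)
def pvFirstOccs : List Int → List Int
  | [] => []
  | x :: xs => x :: (pvFirstOccs xs).filter (fun y => y ≠ x)

-- `[node for node, parent in tree.items() if parent == p]`
def pvChildren (tree : List (Int × Int)) (p : Int) : List Int :=
  tree.filterMap (fun nt => if nt.2 = p then some nt.1 else none)

def tree2dict_alt (tree : List (Int × Int)) : List (Int × List Int) :=
  (pvFirstOccs (tree.map Prod.snd)).map (fun p => (p, pvChildren tree p))

-- ===== PRECONDITION & SPEC =====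
def Spec_tree2dict (tree : List (Int × Int)) (out : List (Int × List Int)) : Prop := out = tree2dict_alt tree
instance (tree : List (Int × Int)) (out : List (Int × List Int)) : Decidable (Spec_tree2dict tree out) := by unfold Spec_tree2dict; infer_instance

-- ===== CLAIM (what is proved, stated in full; the proofs are below) =====
def Claim_equal_tree2dict : Prop := ∀ (tree : List (Int × Int)), Dom_tree2dict tree → Spec_tree2dict tree (tree2dict tree)

-- ===== LEMMAS AND PROOFS =====

lemma pvChildren_cons (n p q : Int) (rest : List (Int × Int)) :
    pvChildren ((n, p) :: rest) q =
      if p = q then n :: pvChildren rest q else pvChildren rest q := by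
  by_cases h : p = q <;> simp [pvChildren, h]

lemma pvAppendAt_keys (d : List (Int × List Int)) (p n : Int) :
    (pvAppendAt d p n).map Prod.fst = d.map Prod.fst := by
  induction d with
  | nil => rfl
  | cons kv d ih =>
      obtain ⟨k, v⟩ := kv
      by_cases h : k = p <;> simp [pvAppendAt, h, ih]

lemma pvAppendAt_map (d : List (Int × List Int)) (p n : Int) (rest : List (Int × Int))
    (hnd : (d.map Prod.fst).Nodup) (hp : p ∈ d.map Prod.fst) :
    (pvAppendAt d p n).map (fun kv => (kv.1, kv.2 ++ pvChildren rest kv.1)) =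
      d.map (fun kv => (kv.1, kv.2 ++ pvChildren ((n, p) :: rest) kv.1)) := by
  induction d with
  | nil => simp at hp
  | cons kv d ih =>
      obtain ⟨k, v⟩ := kv
      rw [List.map_cons, List.nodup_cons] at hnd
      by_cases h : k = p
      · subst h
        have htail : d.map (fun kv => (kv.1, kv.2 ++ pvChildren rest kv.1)) =
            d.map (fun kv => (kv.1, kv.2 ++ pvChildren ((n, k) :: rest) kv.1)) := by
          refine List.map_congr_left (fun kv' hkv' => ?_)
          have hk' : ¬ k = kv'.1 := fun he =>
            hnd.1 (by rw [he]; exact List.mem_map.mpr ⟨kv', hkv', rfl⟩)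
          rw [pvChildren_cons, if_neg hk']
        rw [show pvAppendAt ((k, v) :: d) k n = (k, v ++ [n]) :: d from by simp [pvAppendAt]]
        rw [List.map_cons, List.map_cons, htail]
        congr 1
        rw [pvChildren_cons, if_pos rfl]
        simp
      · have hp' : p ∈ List.map Prod.fst d := by
          simp only [List.map_cons, List.mem_cons] at hp
          rcases hp with h1 | h1
          · exact absurd h1.symm h
          · exact h1
        have hpk : ¬ p = k := fun he => h he.symm
        simp only [pvAppendAt, if_neg h, List.map_cons, ih hnd.2 hp', pvChildren_cons,
          if_neg hpk]

-- A's fold from an arbitrary accumulator d with distinct keys: every existing entry gains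
-- its children from `tree`, and the parents of `tree` not yet in d are appended, in
-- first-occurrence order, each with its full child list.
lemma pvGroup_eq (tree : List (Int × Int)) :
    ∀ d : List (Int × List Int), (d.map Prod.fst).Nodup →
      tree.foldl
          (fun d nt =>
            if pvHasKey d nt.2 then pvAppendAt d nt.2 nt.1
            else d ++ [(nt.2, [nt.1])]) d =
        d.map (fun kv => (kv.1, kv.2 ++ pvChildren tree kv.1)) ++
          ((pvFirstOccs (tree.map Prod.snd)).filter
              (fun q => ¬ q ∈ d.map Prod.fst)).map (fun p => (p, pvChildren tree p)) := by
  induction tree with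
  | nil =>
      intro d _
      simp [pvChildren, pvFirstOccs]
  | cons nt rest ih =>
      intro d hnd
      obtain ⟨n, p⟩ := nt
      simp only [List.foldl_cons, List.map_cons]
      by_cases hp : p ∈ d.map Prod.fst
      · have hkey : pvHasKey d p = true := by simpa [pvHasKey] using hp
        rw [if_pos hkey]
        have hnd' : ((pvAppendAt d p n).map Prod.fst).Nodup := by
          rw [pvAppendAt_keys]; exact hnd
        rw [ih _ hnd', pvAppendAt_map d p n rest hnd hp, pvAppendAt_keys]
        have h1 : (pvFirstOccs (p :: rest.map Prod.snd)).filter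
              (fun q => ¬ q ∈ d.map Prod.fst) =
            (pvFirstOccs (rest.map Prod.snd)).filter (fun q => ¬ q ∈ d.map Prod.fst) := by
          rw [pvFirstOccs, List.filter_cons_of_neg (by simpa using hp), List.filter_filter]
          refine List.filter_congr (fun q _ => ?_)
          by_cases hqp : q = p
          · subst hqp; simp [hp]
          · simp [hqp]
        rw [h1]
        congr 1
        refine (List.map_congr_left (fun q hq => ?_)).symm
        have hqK : ¬ q ∈ d.map Prod.fst := by simpa using (List.mem_filter.mp hq).2
        have hpq : ¬ p = q := fun he => hqK (he ▸ hp)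
        rw [pvChildren_cons, if_neg hpq]
      · have hkey : ¬ pvHasKey d p = true := by simpa [pvHasKey] using hp
        rw [if_neg hkey]
        have hnd' : (((d ++ [(p, [n])]).map Prod.fst)).Nodup := by
          simp only [List.map_append, List.map_cons, List.map_nil]
          refine List.nodup_append.mpr ⟨hnd, List.nodup_singleton p, ?_⟩
          intro a ha b hb
          have hbp : b = p := by simpa using hb
          subst hbp
          exact fun he => hp (he ▸ ha)
        rw [ih _ hnd']
        have hA : (d ++ [(p, [n])]).map
              (fun kv => (kv.1, kv.2 ++ pvChildren rest kv.1)) =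
            d.map (fun kv => (kv.1, kv.2 ++ pvChildren ((n, p) :: rest) kv.1)) ++
              [(p, [n] ++ pvChildren rest p)] := by
          rw [List.map_append]
          have h2 : d.map (fun kv => (kv.1, kv.2 ++ pvChildren rest kv.1)) =
              d.map (fun kv => (kv.1, kv.2 ++ pvChildren ((n, p) :: rest) kv.1)) := by
            refine List.map_congr_left (fun kv hkv => ?_)
            have hk : ¬ p = kv.1 := fun he =>
              hp (by rw [he]; exact List.mem_map.mpr ⟨kv, hkv, rfl⟩)
            rw [pvChildren_cons, if_neg hk]
          rw [h2]
          rfl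
        have hB : (pvFirstOccs (p :: rest.map Prod.snd)).filter
              (fun q => ¬ q ∈ d.map Prod.fst) =
            p :: (pvFirstOccs (rest.map Prod.snd)).filter
              (fun q => ¬ q ∈ (d ++ [(p, [n])]).map Prod.fst) := by
          rw [pvFirstOccs, List.filter_cons_of_pos (by simpa using hp), List.filter_filter]
          have h3 : List.filter
                (fun a => (¬ a ∈ d.map Prod.fst : Bool) && (a ≠ p : Bool))
                (pvFirstOccs (rest.map Prod.snd)) =
              List.filter (fun q => ¬ q ∈ (d ++ [(p, [n])]).map Prod.fst)
                (pvFirstOccs (rest.map Prod.snd)) := by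
            refine List.filter_congr (fun q _ => ?_)
            by_cases hqp : q = p
            · subst hqp; simp
            · simp [hqp]
          rw [h3]
        rw [hA, hB, List.map_cons, List.append_assoc, List.singleton_append]
        congr 1
        congr 1
        · rw [pvChildren_cons, if_pos rfl]; simp
        · refine (List.map_congr_left (fun q hq => ?_)).symm
          have hq2 : ¬ q ∈ (d ++ [(p, [n])]).map Prod.fst := by
            simpa using (List.mem_filter.mp hq).2
          have hpq : ¬ p = q := fun he => hq2 (by rw [← he]; simp)
          rw [pvChildren_cons, if_neg hpq]

-- ===== VERDICT (by name: the statement is the Claim_ definition above) =====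
theorem tree2dict_spec : Claim_equal_tree2dict := by
  intro tree _
  show tree2dict tree = tree2dict_alt tree
  rw [tree2dict, pvGroup_eq tree [] (by simp)]
  simp [tree2dict_alt]
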